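-- pv_equiv track=rewrite | github.com/KshitizSethia/AcroDisam | server/Benchmarker/Benchmark.py | __verifyTrainSet
-- ===== SOURCE A (Python) =====
-- def __verifyTrainSet(articleDB, acronymDB, testArticleIDs):
--     for articleId in articleDB:
--         if(articleId in testArticleIDs):
--             return False
--     for acronym in acronymDB:
--         for expansion, articleId, ignored_field in acronymDB[acronym]:
--             if articleId in testArticleIDs:
--                 return False
--     return True
-- ===== SOURCE B (Python) =====
-- def __verifyTrainSet(articleDB, acronymDB, testArticleIDs):
--     trainIds = set(articleDB)
--     for triples in acronymDB.values():
--         for _, articleId, _ in triples: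
--             trainIds.add(articleId)
--     return trainIds.isdisjoint(testArticleIDs)
-- ===== Notes on version B (the rewrite author's own statement) =====
-- stated objective: simpler
-- what changed: A runs two early-exit membership scans (one per DB, with an inner scan per acronym); B builds one set of all training article IDs in a single pass and finishes with one isdisjoint test.
import Mathlib
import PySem

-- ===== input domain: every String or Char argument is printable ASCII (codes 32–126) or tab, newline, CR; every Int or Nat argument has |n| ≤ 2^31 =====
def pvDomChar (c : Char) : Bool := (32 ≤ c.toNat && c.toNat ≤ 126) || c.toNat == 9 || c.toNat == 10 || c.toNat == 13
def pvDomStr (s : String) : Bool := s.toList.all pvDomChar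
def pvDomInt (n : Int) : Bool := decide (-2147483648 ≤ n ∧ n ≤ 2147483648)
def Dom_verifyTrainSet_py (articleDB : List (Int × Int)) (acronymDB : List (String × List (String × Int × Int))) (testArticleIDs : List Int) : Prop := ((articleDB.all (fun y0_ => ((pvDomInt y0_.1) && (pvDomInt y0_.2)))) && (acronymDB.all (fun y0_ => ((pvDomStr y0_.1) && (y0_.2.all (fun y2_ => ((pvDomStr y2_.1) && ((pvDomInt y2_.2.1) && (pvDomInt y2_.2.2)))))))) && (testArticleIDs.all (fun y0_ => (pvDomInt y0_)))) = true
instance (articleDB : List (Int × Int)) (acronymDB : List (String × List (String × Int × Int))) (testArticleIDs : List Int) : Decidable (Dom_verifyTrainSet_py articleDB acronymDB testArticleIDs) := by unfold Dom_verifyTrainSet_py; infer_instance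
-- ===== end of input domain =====

-- B builds one set of all training article IDs in a single pass and tests disjointness,
-- replacing A's two early-exit membership scans (objective: simpler).


-- ===== PORT A =====
-- first loop: 'for articleId in articleDB: if articleId in testArticleIDs: return False'
-- (true = the loop fell through without returning)
def pvA_loop1 (ks : List Int) (test : List Int) : Bool :=
  match ks with
  | [] => true
  | k :: rest => if k ∈ test then false else pvA_loop1 rest test

-- inner loop: 'for expansion, articleId, ignored_field in acronymDB[acronym]: …'
def pvA_inner (triples : List (String × Int × Int)) (test : List Int) : Bool :=
  match triples with
  | [] => true
  | t :: rest => if t.2.1 ∈ test then false else pvA_inner rest test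

-- second loop: 'for acronym in acronymDB: …' with the lookup acronymDB[acronym]
-- realised as iteration over the dict's (key, value) items
def pvA_loop2 (items : List (String × List (String × Int × Int))) (test : List Int) : Bool :=
  match items with
  | [] => true
  | p :: rest => if pvA_inner p.2 test then pvA_loop2 rest test else false

def verifyTrainSet_py (articleDB : List (Int × Int)) (acronymDB : List (String × List (String × Int × Int))) (testArticleIDs : List Int) : Bool :=
  if pvA_loop1 (PySem.Dict.ofList articleDB).keys testArticleIDs then
    if pvA_loop2 (PySem.Dict.ofList acronymDB).items testArticleIDs then true
    else false
  else false

-- ===== PORT B =====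
def verifyTrainSet_py_alt (articleDB : List (Int × Int)) (acronymDB : List (String × List (String × Int × Int))) (testArticleIDs : List Int) : Bool :=
  let trainIds : PySem.Set Int := PySem.Set.ofList (PySem.Dict.ofList articleDB).keys
  let trainIds := (PySem.Dict.ofList acronymDB).values.foldl
    (fun s triples => triples.foldl (fun s t => PySem.Set.add s t.2.1) s) trainIds
  PySem.Set.isdisjoint trainIds testArticleIDs

-- ===== PRECONDITION & SPEC =====
def Spec_verifyTrainSet_py (articleDB : List (Int × Int)) (acronymDB : List (String × List (String × Int × Int))) (testArticleIDs : List Int) (out : Bool) : Prop := out = verifyTrainSet_py_alt articleDB acronymDB testArticleIDs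
instance (articleDB : List (Int × Int)) (acronymDB : List (String × List (String × Int × Int))) (testArticleIDs : List Int) (out : Bool) : Decidable (Spec_verifyTrainSet_py articleDB acronymDB testArticleIDs out) := by unfold Spec_verifyTrainSet_py; infer_instance

-- ===== CLAIM (what is proved, stated in full; the proofs are below) =====
def Claim_equal_verifyTrainSet_py : Prop := ∀ (articleDB : List (Int × Int)) (acronymDB : List (String × List (String × Int × Int))) (testArticleIDs : List Int), Dom_verifyTrainSet_py articleDB acronymDB testArticleIDs → Spec_verifyTrainSet_py articleDB acronymDB testArticleIDs (verifyTrainSet_py articleDB acronymDB testArticleIDs)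

-- ===== LEMMAS AND PROOFS =====

theorem pvA_loop1_eq_true_iff (ks test : List Int) :
    pvA_loop1 ks test = true ↔ ∀ k ∈ ks, k ∉ test := by
  induction ks with
  | nil => simp [pvA_loop1]
  | cons k rest ih => by_cases h : k ∈ test <;> simp [pvA_loop1, h, ih]

theorem pvA_inner_eq_true_iff (triples : List (String × Int × Int)) (test : List Int) :
    pvA_inner triples test = true ↔ ∀ t ∈ triples, t.2.1 ∉ test := by
  induction triples with
  | nil => simp [pvA_inner]
  | cons t rest ih => by_cases h : t.2.1 ∈ test <;> simp [pvA_inner, h, ih]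

theorem pvA_loop2_eq_true_iff (items : List (String × List (String × Int × Int))) (test : List Int) :
    pvA_loop2 items test = true ↔ ∀ p ∈ items, ∀ t ∈ p.2, t.2.1 ∉ test := by
  induction items with
  | nil => simp [pvA_loop2]
  | cons p rest ih =>
    cases hX : pvA_inner p.2 test with
    | true =>
      rw [pvA_loop2, if_pos hX, ih, List.forall_mem_cons]
      exact ⟨fun hall => ⟨(pvA_inner_eq_true_iff _ _).mp hX, hall⟩, fun h => h.2⟩
    | false =>
      rw [pvA_loop2, if_neg (by simp [hX])]
      simp only [Bool.false_eq_true, false_iff, List.forall_mem_cons, not_and]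
      intro hp _
      exact absurd ((pvA_inner_eq_true_iff _ _).mpr hp) (by simp [hX])

-- membership in B's accumulated set of training ids
theorem pvB_mem_fold (vals : List (List (String × Int × Int))) (s : PySem.Set Int) (x : Int) :
    x ∈ vals.foldl (fun s triples => triples.foldl (fun s t => PySem.Set.add s t.2.1) s) s ↔
      x ∈ s ∨ ∃ v ∈ vals, ∃ t ∈ v, x = t.2.1 := by
  induction vals generalizing s with
  | nil => simp
  | cons v rest ih =>
    simp only [List.foldl_cons, ih, PySem.Set.mem_foldl_add]
    constructor
    · rintro (⟨hs | ⟨t, ht, rfl⟩⟩ | ⟨w, hw, t, ht, rfl⟩)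
      · exact Or.inl hs
      · exact Or.inr ⟨v, by simp, t, ht, rfl⟩
      · exact Or.inr ⟨w, by simp [hw], t, ht, rfl⟩
    · rintro (hs | ⟨w, hw, t, ht, rfl⟩)
      · exact Or.inl (Or.inl hs)
      · rcases List.mem_cons.mp hw with rfl | hw
        · exact Or.inl (Or.inr ⟨t, ht, rfl⟩)
        · exact Or.inr ⟨w, hw, t, ht, rfl⟩

theorem pvB_eq_true_iff (articleDB : List (Int × Int)) (acronymDB : List (String × List (String × Int × Int))) (test : List Int) :
    verifyTrainSet_py_alt articleDB acronymDB test = true ↔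
      ∀ x, (x ∈ (PySem.Dict.ofList articleDB).keys ∨
        ∃ v ∈ (PySem.Dict.ofList acronymDB).values, ∃ t ∈ v, x = t.2.1) → x ∉ test := by
  unfold verifyTrainSet_py_alt
  rw [PySem.Set.isdisjoint_iff]
  constructor
  · intro h x hx
    exact h x (by rw [pvB_mem_fold]; simpa [PySem.Set.mem_ofList] using hx)
  · intro h x hx
    rw [pvB_mem_fold] at hx
    exact h x (by simpa [PySem.Set.mem_ofList] using hx)

-- ===== VERDICT (by name: the statement is the Claim_ definition above) =====
theorem verifyTrainSet_py_spec : Claim_equal_verifyTrainSet_py := by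
  intro articleDB acronymDB test _
  unfold Spec_verifyTrainSet_py
  rw [Bool.eq_iff_iff, pvB_eq_true_iff]
  unfold verifyTrainSet_py
  by_cases h1 : pvA_loop1 (PySem.Dict.ofList articleDB).keys test = true
  · by_cases h2 : pvA_loop2 (PySem.Dict.ofList acronymDB).items test = true
    · rw [if_pos h1, if_pos h2]
      simp only [true_iff]
      rw [pvA_loop1_eq_true_iff] at h1
      rw [pvA_loop2_eq_true_iff] at h2
      rintro x (hx | ⟨v, hv, t, ht, rfl⟩)
      · exact h1 x hx
      · obtain ⟨p, hp, rfl⟩ := List.mem_map.mp hv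
        exact h2 p hp t ht
    · rw [if_pos h1, if_neg h2]
      simp only [Bool.false_eq_true, false_iff]
      have h2' : ¬ (∀ p ∈ (PySem.Dict.ofList acronymDB).items, ∀ t ∈ p.2, t.2.1 ∉ test) :=
        fun hall => h2 ((pvA_loop2_eq_true_iff _ _).mpr hall)
      push Not at h2'
      obtain ⟨p, hp, t, ht, htm⟩ := h2'
      exact fun hall => (hall t.2.1 (Or.inr ⟨p.2, List.mem_map.mpr ⟨p, hp, rfl⟩, t, ht, rfl⟩)) htm
  · rw [if_neg h1]
    simp only [Bool.false_eq_true, false_iff]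
    have h1' : ¬ (∀ k ∈ (PySem.Dict.ofList articleDB).keys, k ∉ test) :=
      fun hall => h1 ((pvA_loop1_eq_true_iff _ _).mpr hall)
    push Not at h1'
    obtain ⟨k, hk, hkm⟩ := h1'
    exact fun hall => (hall k (Or.inl hk)) hkm
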